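-- pv_equiv track=rewrite | github.com/DRMF/DRMF-Seeding-Project | macro_replacement/utilities.py | get_line_lengths
-- ===== SOURCE A (Python) =====
-- def get_line_lengths(content):
--     """
--     Returns a list of the total number of bytes before the end of each line in content.
--     """
--
--     lengths = [0]
--
--     total = 0
--
--     #go through every line
--     for i, line in enumerate(content.split("\n")):
--
--         length = len(line)
--
--         total += length + 1    #account for missing newlines
--         lengths.append(total)
--
--     return lengths
-- ===== SOURCE B (Python) =====
-- def get_line_lengths(content):
--     lengths = [0]
--     for i, ch in enumerate(content):
--         if ch == "\n":
--             lengths.append(i + 1)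
--     lengths.append(len(content) + 1)
--     return lengths
-- ===== Notes on version B (the rewrite author's own statement) =====
-- stated objective: alternative
-- what changed: Instead of splitting on '\n' and prefix-summing line lengths, B scans the characters once and records each newline's index + 1 directly (a newline at index i means i+1 bytes precede the next line), appending len(content)+1 as the final total.
import Mathlib
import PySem

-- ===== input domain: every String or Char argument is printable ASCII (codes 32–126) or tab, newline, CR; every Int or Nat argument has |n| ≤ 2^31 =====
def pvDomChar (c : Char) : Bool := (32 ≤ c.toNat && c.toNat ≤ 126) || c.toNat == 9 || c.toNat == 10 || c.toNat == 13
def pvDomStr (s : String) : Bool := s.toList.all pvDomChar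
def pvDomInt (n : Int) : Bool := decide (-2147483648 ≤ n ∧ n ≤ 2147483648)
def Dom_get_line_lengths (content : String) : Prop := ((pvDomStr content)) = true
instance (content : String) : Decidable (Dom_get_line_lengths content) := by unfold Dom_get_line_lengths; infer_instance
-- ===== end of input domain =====

-- B replaces A's split-on-newline + running-sum-of-line-lengths with a single character
-- scan that records each newline's index + 1 directly, then appends the final total
-- len(content)+1 (alternative algorithm, same values everywhere).

-- ===== PORT A =====
def get_line_lengths (content : String) : List Int :=
  (((PySem.Str.split? content "\n").getD []).foldl
      (fun (st : Int × List Int) line =>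
        let total := st.1 + PySem.Str.len line + 1
        (total, st.2 ++ [total]))
      (0, [0])).2

-- ===== PORT B =====
def get_line_lengths_alt (content : String) : List Int :=
  let lengths :=
    (PySem.List.enumerate content.toList).foldl
      (fun (acc : List Int) (p : Int × Char) =>
        if p.2 == '\n' then acc ++ [p.1 + 1] else acc)
      [0]
  lengths ++ [(content.toList.length : Int) + 1]

-- ===== PRECONDITION & SPEC =====
def Spec_get_line_lengths (content : String) (out : List Int) : Prop := out = get_line_lengths_alt content
instance (content : String) (out : List Int) : Decidable (Spec_get_line_lengths content out) := by unfold Spec_get_line_lengths; infer_instance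

-- ===== CLAIM (what is proved, stated in full; the proofs are below) =====
def Claim_equal_get_line_lengths : Prop := ∀ (content : String), Dom_get_line_lengths content → Spec_get_line_lengths content (get_line_lengths content)

-- ===== LEMMAS AND PROOFS =====

-- reference splitter for a single-char separator '\n'
def pvSp : List Char → List (List Char)
  | [] => [[]]
  | c :: rest =>
    match pvSp rest with
    | p :: ps => if c = '\n' then [] :: p :: ps else (c :: p) :: ps
    | [] => []

theorem pvSp_ne_nil (cs : List Char) : pvSp cs ≠ [] := by
  induction cs with
  | nil => simp [pvSp]
  | cons c rest ih =>
      cases h : pvSp rest with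
      | nil => exact absurd h ih
      | cons p ps => simp [pvSp, h]; split <;> simp

theorem pv_go_spec (cs : List Char) :
    ∀ (fuel : Nat) (cur : List Char) (acc : List (List Char)), cs.length < fuel →
      PySem.Chars.splitOn.go ['\n'] fuel cs cur acc
      = acc.reverse ++ (match pvSp cs with
          | p :: ps => (cur.reverse ++ p) :: ps
          | [] => []) := by
  induction cs with
  | nil =>
      intro fuel cur acc h
      cases fuel with
      | zero => omega
      | succ m => simp [PySem.Chars.splitOn.go, pvSp]
  | cons c rest ih =>
      intro fuel cur acc h
      cases fuel with
      | zero => omega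
      | succ m =>
        have hm : rest.length < m := by simpa using h
        by_cases hc : c = '\n'
        · subst hc
          have hpre : List.isPrefixOf ['\n'] ('\n' :: rest) = true := by
            simp [List.isPrefixOf]
          rw [PySem.Chars.splitOn.go]
          simp only [hpre, if_true, List.length_cons, List.length_nil, Nat.zero_add,
            List.drop_succ_cons, List.drop_zero]
          rw [ih m [] (cur.reverse :: acc) hm]
          cases hsp : pvSp rest with
          | nil => exact absurd hsp (pvSp_ne_nil rest)
          | cons p ps => simp [pvSp, hsp]
        · have hpre : List.isPrefixOf ['\n'] (c :: rest) = false := by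
            simp [List.isPrefixOf]
            intro h'; exact absurd h'.symm hc
          rw [PySem.Chars.splitOn.go]
          simp only [hpre, Bool.false_eq_true, if_false]
          rw [ih m (c :: cur) acc hm]
          cases hsp : pvSp rest with
          | nil => exact absurd hsp (pvSp_ne_nil rest)
          | cons p ps => simp [pvSp, hsp, hc]

theorem pv_splitOn_eq (cs : List Char) : PySem.Chars.splitOn cs ['\n'] = pvSp cs := by
  unfold PySem.Chars.splitOn
  rw [pv_go_spec cs (cs.length + 1) [] [] (by omega)]
  cases hsp : pvSp cs with
  | nil => exact absurd hsp (pvSp_ne_nil cs)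
  | cons p ps => simp

-- prefix sums of (length + 1) starting from offset k
def pvPsums : Int → List Nat → List Int
  | _, [] => []
  | k, L :: Ls => (k + L + 1) :: pvPsums (k + L + 1) Ls

theorem pv_foldA (parts : List String) :
    ∀ (t : Int) (acc : List Int),
      (parts.foldl
        (fun (st : Int × List Int) line =>
          let total := st.1 + PySem.Str.len line + 1
          (total, st.2 ++ [total]))
        (t, acc)).2
      = acc ++ pvPsums t (parts.map (fun l => l.toList.length)) := by
  induction parts with
  | nil => intro t acc; simp [pvPsums]
  | cons l ls ih =>
      intro t acc
      simp only [List.foldl_cons, List.map_cons]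
      rw [ih]
      simp [pvPsums, PySem.Str.len]

theorem pv_core (cs : List Char) :
    ∀ (n : Int),
      pvPsums n ((pvSp cs).map List.length)
      = ((PySem.List.enumerate cs n).filter (fun p => p.2 == '\n')).map (fun p => p.1 + 1)
        ++ [n + cs.length + 1] := by
  induction cs with
  | nil => intro n; simp [pvSp, pvPsums, PySem.List.enumerate]
  | cons c rest ih =>
      intro n
      cases hsp : pvSp rest with
      | nil => exact absurd hsp (pvSp_ne_nil rest)
      | cons p ps =>
        by_cases hc : c = '\n'
        · subst hc
          have hone : pvSp ('\n' :: rest) = [] :: p :: ps := by simp [pvSp, hsp]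
          rw [hone]
          have ihn := ih (n + 1)
          rw [hsp] at ihn
          simp only [List.map_cons, List.length_nil]
          have hps : pvPsums n ((0 : Nat) :: p.length :: ps.map List.length)
              = (n + 1) :: pvPsums (n + 1) (p.length :: ps.map List.length) := by
            simp [pvPsums]
          rw [hps]
          simp only [List.map_cons] at ihn
          rw [ihn]
          simp only [PySem.List.enumerate, List.filter_cons, List.length_cons,
            beq_self_eq_true, if_true, List.map_cons, List.cons_append]
          push_cast
          ring_nf
        · have hone : pvSp (c :: rest) = (c :: p) :: ps := by simp [pvSp, hsp, hc]
          rw [hone]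
          have ihn := ih (n + 1)
          rw [hsp] at ihn
          simp only [List.map_cons, pvPsums] at ihn
          simp only [List.map_cons, List.length_cons, pvPsums]
          rw [show (n + (((p.length + 1 : Nat) : Int)) + 1) = n + 1 + p.length + 1 by
            push_cast; ring]
          rw [ihn]
          simp only [PySem.List.enumerate, List.filter_cons]
          have hcb : (c == '\n') = false := by simpa using hc
          rw [hcb]
          simp only [Bool.false_eq_true, if_false, List.length_cons]
          push_cast
          ring_nf

-- ===== VERDICT (by name: the statement is the Claim_ definition above) =====
theorem get_line_lengths_spec : Claim_equal_get_line_lengths := by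
  intro content _
  unfold Spec_get_line_lengths get_line_lengths get_line_lengths_alt
  have hsplit : PySem.Chars.split? content.toList ['\n'] = some (pvSp content.toList) := by
    simp [PySem.Chars.split?, pv_splitOn_eq]
  cases hS : PySem.Str.split? content "\n" with
  | none =>
      have := PySem.Str.split?_map content "\n"
      rw [hS] at this
      simp at this
      rw [hsplit] at this
      exact absurd this.symm (by simp)
  | some parts =>
      have hmap : parts.map String.toList = pvSp content.toList := by
        have := PySem.Str.split?_map content "\n"
        rw [hS] at this
        simp at this
        rw [hsplit] at this
        exact (Option.some.inj this)
      simp only [Option.getD_some]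
      rw [pv_foldA]
      have hlen : parts.map (fun l => l.toList.length) = (pvSp content.toList).map List.length := by
        rw [← hmap, List.map_map]; rfl
      rw [hlen, pv_core]
      rw [PySem.List.foldl_append_if (fun p => p.2 == '\n') (fun p => p.1 + 1)
            (PySem.List.enumerate content.toList 0) [0]]
      simp
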